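-- pv_equiv track=rewrite | github.com/JINGCW/STL | stl/src/_alg_test/cases.py | check_digit_punctuation_char
-- ===== SOURCE A (Python) =====
-- import string
--
-- def check_digit_punctuation_char(s: list):
--     digit_cnt = 0
--     punctuation_cnt = 0
--     alpha_cnt = 0
--     upper_flag = False
--     lower_flag = False
--     scores = 0
--     for x in s:
--         if x in string.digits:
--             digit_cnt += 1
--
--         if x in string.punctuation:
--             punctuation_cnt += 1
--
--         if x in string.ascii_letters:
--             alpha_cnt += 1
--             if x in string.ascii_uppercase:
--                 upper_flag = True
--             if x in string.ascii_lowercase: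
--                 lower_flag = True
--
--     if not digit_cnt:
--         scores += 0
--     elif digit_cnt == 1:
--         scores += 10
--     else:
--         scores += 20
--
--     if not punctuation_cnt:
--         scores += 0
--     elif punctuation_cnt == 1:
--         scores += 10
--     else:
--         scores += 25
--
--     if not alpha_cnt:
--         scores += 0
--     elif upper_flag and lower_flag:
--         scores += 20
--     else:
--         scores += 10
--
--     if alpha_cnt and digit_cnt:
--         scores += 2
--     if punctuation_cnt:
--         scores += 1
--     if upper_flag and lower_flag:
--         scores += 2
--
--     return scores
-- ===== SOURCE B (Python) =====
-- import string
--
--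
-- def check_digit_punctuation_char(s: list):
--     # Build the distinct-element table once, then score from per-key counts.
--     distinct = list(dict.fromkeys(s))
--     digit_cnt = sum(s.count(x) for x in distinct if x in string.digits)
--     punctuation_cnt = sum(s.count(x) for x in distinct if x in string.punctuation)
--     alpha_cnt = sum(s.count(x) for x in distinct if x in string.ascii_letters)
--     upper_flag = any(x in string.ascii_uppercase for x in distinct)
--     lower_flag = any(x in string.ascii_lowercase for x in distinct)
--
--     def bucket(n, one, many):
--         return 0 if n == 0 else one if n == 1 else many
--
--     scores = bucket(digit_cnt, 10, 20)
--     scores += bucket(punctuation_cnt, 10, 25)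
--     scores += 0 if alpha_cnt == 0 else 20 if upper_flag and lower_flag else 10
--     scores += 2 if alpha_cnt and digit_cnt else 0
--     scores += 1 if punctuation_cnt else 0
--     scores += 2 if upper_flag and lower_flag else 0
--     return scores
-- ===== Notes on version B (the rewrite author's own statement) =====
-- stated objective: alternative
-- what changed: A makes one pass with five running accumulators; B first builds the distinct-element table (ordered dedup) and derives each class count by summing per-key occurrence counts over that table, and the case flags by any() over the distinct keys, keeping Python's substring 'in' tests on whole elements.
import Mathlib
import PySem

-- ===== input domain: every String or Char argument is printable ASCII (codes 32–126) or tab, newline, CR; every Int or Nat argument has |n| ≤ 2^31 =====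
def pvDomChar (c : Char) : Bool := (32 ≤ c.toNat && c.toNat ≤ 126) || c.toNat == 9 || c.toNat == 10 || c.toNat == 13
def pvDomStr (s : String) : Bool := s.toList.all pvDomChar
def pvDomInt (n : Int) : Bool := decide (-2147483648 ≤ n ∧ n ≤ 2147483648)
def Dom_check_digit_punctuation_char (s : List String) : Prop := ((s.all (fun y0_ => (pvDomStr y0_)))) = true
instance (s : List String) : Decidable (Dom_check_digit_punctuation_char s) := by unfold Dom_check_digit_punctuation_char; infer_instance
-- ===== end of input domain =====

-- B replaces A's five-accumulator scan with a distinct-element table (ordered dedup) whose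
-- per-key counts are summed per character class (objective: alternative decomposition).
-- Membership tests stay Python's substring 'in' on the whole elements, as in A.

def pyDigits : String := "0123456789"
def pyPunct : String := "!\"#$%&'()*+,-./:;<=>?@[\\]^_`{|}~"
def pyLower : String := "abcdefghijklmnopqrstuvwxyz"
def pyUpper : String := "ABCDEFGHIJKLMNOPQRSTUVWXYZ"
def pyLetters : String := "abcdefghijklmnopqrstuvwxyzABCDEFGHIJKLMNOPQRSTUVWXYZ"

-- ===== PORT A =====
def pvStepA (acc : Int × Int × Int × Bool × Bool) (x : String) : Int × Int × Int × Bool × Bool :=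
  let dc := if PySem.Str.isIn x pyDigits then acc.1 + 1 else acc.1
  let pc := if PySem.Str.isIn x pyPunct then acc.2.1 + 1 else acc.2.1
  let aul : Int × Bool × Bool :=
    if PySem.Str.isIn x pyLetters then
      (acc.2.2.1 + 1,
       if PySem.Str.isIn x pyUpper then true else acc.2.2.2.1,
       if PySem.Str.isIn x pyLower then true else acc.2.2.2.2)
    else acc.2.2
  (dc, pc, aul)

def check_digit_punctuation_char (s : List String) : Int :=
  let st := s.foldl pvStepA (0, 0, 0, false, false)
  let scores : Int := 0
  let scores := scores + (if st.1 = 0 then 0 else if st.1 = 1 then 10 else 20)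
  let scores := scores + (if st.2.1 = 0 then 0 else if st.2.1 = 1 then 10 else 25)
  let scores := scores + (if st.2.2.1 = 0 then 0 else if st.2.2.2.1 && st.2.2.2.2 then 20 else 10)
  let scores := scores + (if st.2.2.1 ≠ 0 ∧ st.1 ≠ 0 then 2 else 0)
  let scores := scores + (if st.2.1 ≠ 0 then 1 else 0)
  let scores := scores + (if st.2.2.2.1 && st.2.2.2.2 then 2 else 0)
  scores

-- ===== PORT B =====
def pvBucket (n one many : Int) : Int := if n = 0 then 0 else if n = 1 then one else many

def pvClassSum (s distinct : List String) (cls : String) : Int :=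
  ((distinct.filter (fun x => PySem.Str.isIn x cls)).map
    (fun x => (PySem.List.count s x : Int))).sum

def check_digit_punctuation_char_alt (s : List String) : Int :=
  let distinct := PySem.List.dedup s
  let digit_cnt := pvClassSum s distinct pyDigits
  let punctuation_cnt := pvClassSum s distinct pyPunct
  let alpha_cnt := pvClassSum s distinct pyLetters
  let upper_flag := distinct.any (fun x => PySem.Str.isIn x pyUpper)
  let lower_flag := distinct.any (fun x => PySem.Str.isIn x pyLower)
  pvBucket digit_cnt 10 20 + pvBucket punctuation_cnt 10 25
    + (if alpha_cnt = 0 then 0 else if upper_flag && lower_flag then 20 else 10)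
    + (if alpha_cnt ≠ 0 ∧ digit_cnt ≠ 0 then 2 else 0)
    + (if punctuation_cnt ≠ 0 then 1 else 0)
    + (if upper_flag && lower_flag then 2 else 0)

-- ===== PRECONDITION & SPEC =====
def Spec_check_digit_punctuation_char (s : List String) (out : Int) : Prop := out = check_digit_punctuation_char_alt s
instance (s : List String) (out : Int) : Decidable (Spec_check_digit_punctuation_char s out) := by unfold Spec_check_digit_punctuation_char; infer_instance

-- ===== CLAIM (what is proved, stated in full; the proofs are below) =====
def Claim_equal_check_digit_punctuation_char : Prop := ∀ (s : List String), Dom_check_digit_punctuation_char s → Spec_check_digit_punctuation_char s (check_digit_punctuation_char s)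

-- ===== LEMMAS AND PROOFS =====

-- A's fold computes the three class counts and the two flags in closed form.
lemma stepA_eq (d p a : Int) (u l : Bool) (x : String) :
    pvStepA (d, p, a, u, l) x =
      ((if PySem.Str.isIn x pyDigits then d + 1 else d),
       (if PySem.Str.isIn x pyPunct then p + 1 else p),
       (if PySem.Str.isIn x pyLetters then a + 1 else a),
       ((PySem.Str.isIn x pyLetters && PySem.Str.isIn x pyUpper) || u),
       ((PySem.Str.isIn x pyLetters && PySem.Str.isIn x pyLower) || l)) := by
  cases hL : PySem.Str.isIn x pyLetters <;>
    cases hU : PySem.Str.isIn x pyUpper <;>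
    cases hLo : PySem.Str.isIn x pyLower <;>
    simp only [pvStepA, hL, hU, hLo] <;> simp

lemma foldA_eq (s : List String) (d p a : Int) (u l : Bool) :
    s.foldl pvStepA (d, p, a, u, l) =
      (d + (s.countP (fun x => PySem.Str.isIn x pyDigits) : Int),
       p + (s.countP (fun x => PySem.Str.isIn x pyPunct) : Int),
       a + (s.countP (fun x => PySem.Str.isIn x pyLetters) : Int),
       u || s.any (fun x => PySem.Str.isIn x pyLetters && PySem.Str.isIn x pyUpper),
       l || s.any (fun x => PySem.Str.isIn x pyLetters && PySem.Str.isIn x pyLower)) := by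
  induction s generalizing d p a u l with
  | nil => simp
  | cons x t ih =>
    rw [List.foldl_cons, stepA_eq, ih]
    simp only [List.countP_cons, List.any_cons, Prod.mk.injEq]
    refine ⟨?_, ?_, ?_, ?_, ?_⟩
    · split_ifs <;> push_cast <;> ring
    · split_ifs <;> push_cast <;> ring
    · split_ifs <;> push_cast <;> ring
    · cases (PySem.Str.isIn x pyLetters && PySem.Str.isIn x pyUpper) <;> cases u <;> simp
    · cases (PySem.Str.isIn x pyLetters && PySem.Str.isIn x pyLower) <;> cases l <;> simp

lemma sum_indicator {α : Type} [DecidableEq α] (m : List α) (y : α)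
    (hm : m.Nodup) (hy : y ∈ m) :
    (m.map (fun x => if x = y then 1 else 0)).sum = 1 := by
  induction m with
  | nil => cases hy
  | cons z m ih =>
    rcases List.mem_cons.mp hy with h | h
    · subst h
      have hz : (m.map (fun x => if x = y then 1 else 0)).sum = 0 := by
        apply List.sum_eq_zero
        intro x hx
        obtain ⟨b, hb, rfl⟩ := List.mem_map.mp hx
        have hb' : b ≠ y := fun e => (List.nodup_cons.mp hm).1 (e ▸ hb)
        simp [hb']
      simp [hz]
    · have hz : z ≠ y := fun e => (List.nodup_cons.mp hm).1 (e ▸ h)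
      simp [hz, ih (List.nodup_cons.mp hm).2 h]

lemma sum_count_eq_length {α : Type} [DecidableEq α] (l m : List α)
    (hm : m.Nodup) (hsub : ∀ x ∈ l, x ∈ m) :
    (m.map (fun x => List.count x l)).sum = l.length := by
  induction l with
  | nil => simp
  | cons y t ih =>
    have h1 : (m.map (fun x => List.count x (y :: t))).sum
        = (m.map (fun x => List.count x t + if x = y then 1 else 0)).sum := by
      congr 1; apply List.map_congr_left; intro x _
      rw [List.count_cons]; congr 1
      by_cases hxy : x = y
      · simp [hxy]
      · simp [hxy, Ne.symm hxy]
    have h2 : (m.map (fun x => List.count x t + if x = y then 1 else 0)).sum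
        = (m.map (fun x => List.count x t)).sum
          + (m.map (fun x => if x = y then 1 else 0)).sum := by
      induction m with
      | nil => simp
      | cons z m ihm =>
        simp
        omega
    rw [h1, h2, ih (fun x hx => hsub x (List.mem_cons_of_mem _ hx)),
        sum_indicator m y hm (hsub y List.mem_cons_self)]
    simp

lemma sum_count_filter {α : Type} [DecidableEq α] (p : α → Bool) (l m : List α) :
    ((m.filter p).map (fun x => List.count x l)).sum
      = (m.map (fun x => List.count x (l.filter p))).sum := by
  induction m with
  | nil => simp
  | cons z m ih =>
    by_cases hz : p z
    · have : List.count z (l.filter p) = List.count z l := List.count_filter (by simp [hz])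
      simp [hz, ih, this]
    · have : List.count z (l.filter p) = 0 :=
        List.count_eq_zero.mpr (fun hmem => hz (List.of_mem_filter hmem))
      simp [hz, ih, this]

-- B's per-class sum over the distinct table equals A's per-element count.
lemma classSum_eq (s : List String) (cls : String) :
    pvClassSum s (PySem.List.dedup s) cls
      = (s.countP (fun x => PySem.Str.isIn x cls) : Int) := by
  unfold pvClassSum
  have hc : ∀ x : String, (PySem.List.count s x : Int) = (List.count x s : Int) := by
    intro x; rw [PySem.List.count_eq]
  calc (((PySem.List.dedup s).filter (fun x => PySem.Str.isIn x cls)).map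
          (fun x => (PySem.List.count s x : Int))).sum
      = ((((PySem.List.dedup s).filter (fun x => PySem.Str.isIn x cls)).map
          (fun x => List.count x s)).sum : Int) := by
        rw [Nat.cast_list_sum, List.map_map]; rfl
    _ = (((PySem.List.dedup s).map
          (fun x => List.count x (s.filter (fun y => PySem.Str.isIn y cls)))).sum : Int) := by
        rw [sum_count_filter]
    _ = ((s.filter (fun y => PySem.Str.isIn y cls)).length : Int) := by
        rw [sum_count_eq_length _ _ (PySem.List.nodup_dedup s)
          (fun x hx => (PySem.List.mem_dedup s x).mpr (List.mem_of_mem_filter hx))]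
    _ = (s.countP (fun x => PySem.Str.isIn x cls) : Int) := by
        rw [List.countP_eq_length_filter]

lemma any_dedup (s : List String) (q : String → Bool) :
    (PySem.List.dedup s).any q = s.any q := by
  rw [Bool.eq_iff_iff, List.any_eq_true, List.any_eq_true]
  constructor
  · rintro ⟨x, hx, hq⟩; exact ⟨x, (PySem.List.mem_dedup s x).mp hx, hq⟩
  · rintro ⟨x, hx, hq⟩; exact ⟨x, (PySem.List.mem_dedup s x).mpr hx, hq⟩

-- ASCII upper/lower blocks are contiguous substrings of the letters block,
-- so Python's substring test against letters is implied by the case-specific one.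
lemma isIn_letters_of_isIn_upper (x : String) (h : PySem.Str.isIn x pyUpper = true) :
    PySem.Str.isIn x pyLetters = true := by
  rw [PySem.Str.isIn_iff_infix] at h ⊢
  exact h.trans (by decide)

lemma isIn_letters_of_isIn_lower (x : String) (h : PySem.Str.isIn x pyLower = true) :
    PySem.Str.isIn x pyLetters = true := by
  rw [PySem.Str.isIn_iff_infix] at h ⊢
  exact h.trans (by decide)

lemma flag_cond_upper (x : String) :
    (PySem.Str.isIn x pyLetters && PySem.Str.isIn x pyUpper) = PySem.Str.isIn x pyUpper := by
  cases h : PySem.Str.isIn x pyUpper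
  · rw [Bool.and_false]
  · rw [Bool.and_true]; exact isIn_letters_of_isIn_upper x h

lemma flag_cond_lower (x : String) :
    (PySem.Str.isIn x pyLetters && PySem.Str.isIn x pyLower) = PySem.Str.isIn x pyLower := by
  cases h : PySem.Str.isIn x pyLower
  · rw [Bool.and_false]
  · rw [Bool.and_true]; exact isIn_letters_of_isIn_lower x h

-- ===== VERDICT (by name: the statement is the Claim_ definition above) =====
theorem check_digit_punctuation_char_spec : Claim_equal_check_digit_punctuation_char := by
  intro s _
  show check_digit_punctuation_char s = check_digit_punctuation_char_alt s
  simp only [check_digit_punctuation_char, check_digit_punctuation_char_alt, foldA_eq,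
    zero_add, Bool.false_or, flag_cond_upper, flag_cond_lower, classSum_eq, any_dedup, pvBucket]
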